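-- pv_equiv track=rewrite | github.com/niamul64/study-4.1 | cse 406/code/Operating system lab/disk scheduling/345/SCAN.py | splitQueue
-- ===== SOURCE A (Python) =====
-- def splitQueue(head,array):
--     lower=[]
--     upper=[]
--     for i in array:
--         if i < head :
--             lower.append(i)
--         else:
--             upper.append(i)
--     upper.sort()
--     lower.sort(reverse=True)
--
--
--     return (lower,upper)
-- ===== SOURCE B (Python) =====
-- def splitQueue(head, array):
--     s = sorted(array)
--     lo, hi = 0, len(s)
--     while lo < hi:  # hand-written bisect_left: first index with s[idx] >= head
--         mid = (lo + hi) // 2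
--         if s[mid] < head:
--             lo = mid + 1
--         else:
--             hi = mid
--     lower = s[:lo]
--     lower.reverse()
--     return (lower, s[lo:])
-- ===== Notes on version B (the rewrite author's own statement) =====
-- stated objective: alternative
-- what changed: B sorts the whole array once, finds the head boundary with a hand-written bisect_left binary search, and splits at that index (reversing the low slice), instead of A's element-by-element partition followed by two separate sorts.
import Mathlib
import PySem

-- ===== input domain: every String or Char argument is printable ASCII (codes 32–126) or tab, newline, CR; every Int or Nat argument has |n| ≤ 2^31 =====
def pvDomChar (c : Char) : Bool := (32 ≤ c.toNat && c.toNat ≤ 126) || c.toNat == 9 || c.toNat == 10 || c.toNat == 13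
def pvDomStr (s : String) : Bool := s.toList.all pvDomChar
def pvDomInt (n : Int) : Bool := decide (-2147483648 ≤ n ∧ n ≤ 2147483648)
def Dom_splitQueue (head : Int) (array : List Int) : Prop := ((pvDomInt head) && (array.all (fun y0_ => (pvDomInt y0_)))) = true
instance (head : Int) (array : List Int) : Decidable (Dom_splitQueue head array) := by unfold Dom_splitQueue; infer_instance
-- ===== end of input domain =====

-- B replaces A's partition-then-two-sorts with one full sort followed by a hand-written
-- binary search (bisect_left) for the head boundary and a split at that index (objective: alternative).

-- ===== PORT A =====
-- one loop appending each element to lower (i < head) or upper (else), then sort both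
def splitQueue (head : Int) (array : List Int) : List Int × List Int :=
  let st := array.foldl
    (fun (acc : List Int × List Int) i =>
      if i < head then (acc.1 ++ [i], acc.2) else (acc.1, acc.2 ++ [i]))
    ([], [])
  (PySem.List.sorted st.1 (fun x => x) true, PySem.List.sorted st.2 (fun x => x) false)

-- ===== PORT B =====
-- the while-loop of Source B: binary search for the first index with s[idx] ≥ head;
-- s[mid] is always in range when lo < hi ≤ len s, so getD 0 is exact there
def pvBisect (s : List Int) (head : Int) (lo hi : Nat) : Nat :=
  if lo < hi then
    let mid := (lo + hi) / 2
    if s.getD mid 0 < head then pvBisect s head (mid + 1) hi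
    else pvBisect s head lo mid
  else lo
termination_by hi - lo
decreasing_by all_goals omega

-- slices s[:lo] / s[lo:] with 0 ≤ lo ≤ len s are exactly take/drop
def splitQueue_alt (head : Int) (array : List Int) : List Int × List Int :=
  let s := PySem.List.sorted array (fun x => x) false
  let lo := pvBisect s head 0 s.length
  ((s.take lo).reverse, s.drop lo)

-- ===== PRECONDITION & SPEC =====
def Spec_splitQueue (head : Int) (array : List Int) (out : List Int × List Int) : Prop := out = splitQueue_alt head array
instance (head : Int) (array : List Int) (out : List Int × List Int) : Decidable (Spec_splitQueue head array out) := by unfold Spec_splitQueue; infer_instance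

-- ===== CLAIM (what is proved, stated in full; the proofs are below) =====
def Claim_equal_splitQueue : Prop := ∀ (head : Int) (array : List Int), Dom_splitQueue head array → Spec_splitQueue head array (splitQueue head array)

-- ===== LEMMAS AND PROOFS =====

-- A's loop accumulates exactly (filter (< head), filter (¬ < head))
theorem pv_loop_filter (head : Int) (array : List Int) (acc : List Int × List Int) :
    array.foldl
      (fun (acc : List Int × List Int) i =>
        if i < head then (acc.1 ++ [i], acc.2) else (acc.1, acc.2 ++ [i]))
      acc
    = (acc.1 ++ array.filter (fun i => decide (i < head)),
       acc.2 ++ array.filter (fun i => !decide (i < head))) := by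
  induction array generalizing acc with
  | nil => simp
  | cons a t ih =>
    by_cases h : a < head <;> simp [h, ih]

-- on a ≤-sorted list, filter (< head) is the takeWhile prefix
theorem pv_filter_takeWhile (head : Int) :
    ∀ (s : List Int), s.Pairwise (· ≤ ·) →
      s.filter (fun i => decide (i < head)) = s.takeWhile (fun i => decide (i < head)) := by
  intro s hs
  induction s with
  | nil => rfl
  | cons a t ih =>
    rcases List.pairwise_cons.mp hs with ⟨ha, ht⟩
    by_cases h : a < head
    · simp [h, ih ht]
    · rw [List.takeWhile_cons_of_neg (by simpa using h),
        List.filter_cons_of_neg (by simpa using h),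
        List.filter_eq_nil_iff.mpr]
      intro b hb
      simp only [decide_eq_true_eq]
      exact fun hlt => h (lt_of_le_of_lt (ha b hb) hlt)

-- and filter (¬ < head) is the dropWhile suffix
theorem pv_filter_dropWhile (head : Int) :
    ∀ (s : List Int), s.Pairwise (· ≤ ·) →
      s.filter (fun i => !decide (i < head)) = s.dropWhile (fun i => decide (i < head)) := by
  intro s hs
  induction s with
  | nil => rfl
  | cons a t ih =>
    rcases List.pairwise_cons.mp hs with ⟨ha, ht⟩
    by_cases h : a < head
    · simp [h, ih ht]
    · rw [List.dropWhile_cons_of_neg (by simpa using h),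
        List.filter_cons_of_pos (by simp [h])]
      congr 1
      rw [List.filter_eq_self]
      intro b hb
      simp only [Bool.not_eq_true', decide_eq_false_iff_not]
      exact fun hlt => h (lt_of_le_of_lt (ha b hb) hlt)

-- index characterisation of the takeWhile length on a sorted list
theorem pv_cnt_iff (head : Int) :
    ∀ (s : List Int), s.Pairwise (· ≤ ·) → ∀ i (h : i < s.length),
      (s[i] < head ↔ i < (s.takeWhile (fun i => decide (i < head))).length) := by
  intro s hs
  induction s with
  | nil => intro i h; simp at h
  | cons a t ih =>
    rcases List.pairwise_cons.mp hs with ⟨ha, ht⟩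
    intro i h
    by_cases hp : a < head
    · simp only [List.takeWhile_cons, decide_eq_true_eq, if_pos hp, List.length_cons]
      cases i with
      | zero => simpa using hp
      | succ j =>
        have hj : j < t.length := by simpa using h
        simpa using ih ht j hj
    · simp only [List.takeWhile_cons, decide_eq_true_eq, if_neg hp, List.length_nil]
      constructor
      · intro hlt
        exfalso
        cases i with
        | zero => exact hp (by simpa using hlt)
        | succ j =>
          have hj : j < t.length := by simpa using h
          have : a ≤ t[j] := ha _ (List.getElem_mem hj)
          exact hp (lt_of_le_of_lt this (by simpa using hlt))
      · omega

-- the binary search returns the takeWhile length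
theorem pv_bisect_eq (head : Int) (s : List Int) (hs : s.Pairwise (· ≤ ·)) :
    ∀ lo hi, hi ≤ s.length →
      lo ≤ (s.takeWhile (fun i => decide (i < head))).length →
      (s.takeWhile (fun i => decide (i < head))).length ≤ hi →
      pvBisect s head lo hi = (s.takeWhile (fun i => decide (i < head))).length := by
  intro lo hi
  induction hlh : hi - lo using Nat.strong_induction_on generalizing lo hi with
  | _ n ih =>
    intro hhi hlo hcnt
    rw [pvBisect]
    by_cases h : lo < hi
    · simp only [if_pos h]
      have hmid : (lo + hi) / 2 < s.length := by omega
      have hget : s.getD ((lo + hi) / 2) 0 = s[(lo + hi) / 2] := List.getD_eq_getElem s 0 hmid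
      by_cases hc : s.getD ((lo + hi) / 2) 0 < head
      · simp only [if_pos hc]
        have : (lo + hi) / 2 < (s.takeWhile (fun i => decide (i < head))).length :=
          (pv_cnt_iff head s hs _ hmid).mp (hget ▸ hc)
        exact ih (hi - ((lo + hi) / 2 + 1)) (by omega) _ _ rfl hhi (by omega) hcnt
      · simp only [if_neg hc]
        have : ¬ ((lo + hi) / 2 < (s.takeWhile (fun i => decide (i < head))).length) := by
          intro hlt
          exact hc (hget ▸ ((pv_cnt_iff head s hs _ hmid).mpr hlt))
        exact ih ((lo + hi) / 2 - lo) (by omega) _ _ rfl (by omega) hlo (by omega)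
    · simp only [if_neg h]
      omega

-- descending Python sort is the unique ≥-ordered permutation
theorem pv_sorted_rev_id_eq (xs ys : List Int) (hp : ys.Perm xs)
    (hys : ys.Pairwise (fun a b => b ≤ a)) :
    PySem.List.sorted xs (fun x => x) true = ys := by
  have h1 : (PySem.List.sorted xs (fun x => x) true).Perm ys :=
    (PySem.List.sorted_perm xs (fun x => x) true).trans hp.symm
  have h2 : (PySem.List.sorted xs (fun x => x) true).Pairwise (fun a b => b ≤ a) :=
    PySem.List.sorted_pairwise_rev xs (fun x => x)
  exact h1.eq_of_pairwise (fun a b _ _ hab hba => le_antisymm hba hab) h2 hys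

-- ===== VERDICT (by name: the statement is the Claim_ definition above) =====
theorem splitQueue_spec : Claim_equal_splitQueue := by
  intro head array _
  unfold Spec_splitQueue splitQueue splitQueue_alt
  simp only [pv_loop_filter, List.nil_append]
  set p : Int → Bool := fun i => decide (i < head) with hp
  set s : List Int := PySem.List.sorted array (fun x => x) false with hsdef
  have hs : s.Pairwise (· ≤ ·) := by
    simpa using PySem.List.sorted_pairwise array (fun x => x)
  have hperm : s.Perm array := PySem.List.sorted_perm array (fun x => x) false
  have hcnt := pv_bisect_eq head s hs 0 s.length
    (le_refl _) (Nat.zero_le _) ((List.takeWhile_sublist _).length_le)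
  rw [hcnt]
  set cnt := (s.takeWhile p).length with hcdef
  have hsplit : s.takeWhile p ++ s.dropWhile p = s := List.takeWhile_append_dropWhile
  have htake : s.take cnt = s.takeWhile p := by
    conv_lhs => rw [← hsplit]
    exact List.take_left' rfl
  have hdrop : s.drop cnt = s.dropWhile p := by
    conv_lhs => rw [← hsplit]
    exact List.drop_left' rfl
  rw [htake, hdrop]
  simp only [Prod.mk.injEq]
  constructor
  · -- lower
    apply pv_sorted_rev_id_eq
    · refine (List.reverse_perm _).trans ?_
      rw [← pv_filter_takeWhile head s hs]
      exact hperm.filter p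
    · rw [List.pairwise_reverse]
      exact hs.sublist (List.takeWhile_sublist p)
  · -- upper
    apply PySem.List.sorted_id_eq_of_perm_of_pairwise
    · rw [← pv_filter_dropWhile head s hs]
      exact hperm.filter _
    · exact hs.sublist (List.dropWhile_sublist p)
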